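-- pv_equiv track=rewrite | github.com/tanmaygiriinnovation/spam-call-detection | spam_call_detector.py | _count_sequential_digits
-- ===== SOURCE A (Python) =====
-- def _count_sequential_digits(digits):
--     count = 0
--     digits = digits if digits is not None else ""
--     for i in range(len(digits) - 2):
--         try:
--             a, b, c = int(digits[i]), int(digits[i+1]), int(digits[i+2])
--             if a + 1 == b and b + 1 == c:
--                 count += 1
--         except ValueError:
--             continue
--     return count
-- ===== SOURCE B (Python) =====
-- def _count_sequential_digits(digits):
--     # One left-to-right pass tracking the length of the current run of
--     # ascending consecutive digits; each step that makes the run >= 3 is a triple.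
--     count = 0
--     run = 0
--     prev = None
--     for ch in (digits if digits is not None else ""):
--         try:
--             d = int(ch)
--         except ValueError:
--             run = 0
--             prev = None
--             continue
--         run = run + 1 if prev is not None and d == prev + 1 else 1
--         prev = d
--         if run >= 3:
--             count += 1
--     return count
-- ===== Notes on version B (the rewrite author's own statement) =====
-- stated objective: alternative
-- what changed: Replaced A's indexed sliding-window scan, which re-converts every character with int() up to three times, by a single left-to-right pass that converts each character once and maintains the length of the current ascending-consecutive-digit run, counting each step at which the run reaches length 3 or more.
import Mathlib
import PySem

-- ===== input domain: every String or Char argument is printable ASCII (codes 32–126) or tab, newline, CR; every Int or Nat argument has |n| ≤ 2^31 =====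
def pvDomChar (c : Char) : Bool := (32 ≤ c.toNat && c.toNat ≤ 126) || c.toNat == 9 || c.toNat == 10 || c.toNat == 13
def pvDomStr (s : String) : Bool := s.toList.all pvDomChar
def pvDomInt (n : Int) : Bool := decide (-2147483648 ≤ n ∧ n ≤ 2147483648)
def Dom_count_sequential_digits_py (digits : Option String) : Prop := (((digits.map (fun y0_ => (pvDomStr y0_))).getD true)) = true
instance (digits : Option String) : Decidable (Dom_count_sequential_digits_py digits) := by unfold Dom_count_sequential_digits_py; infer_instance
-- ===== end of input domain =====

-- B replaces A's indexed sliding-window scan (three int() conversions per index) by a single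
-- left-to-right pass over the characters maintaining the current ascending-run length (objective: alternative decomposition).

-- ===== PORT A =====
-- the body of A's try-block for index i: int() of the three chars at i, i+1, i+2 and the ascending test
def pvAscAt (s : List Char) (i : Int) : Bool :=
  match PySem.List.pyGet? s i, PySem.List.pyGet? s (i + 1), PySem.List.pyGet? s (i + 2) with
  | some ca, some cb, some cc =>
    match PySem.Int.ofChars? [ca], PySem.Int.ofChars? [cb], PySem.Int.ofChars? [cc] with
    | some a, some b, some c => decide (a + 1 = b ∧ b + 1 = c)
    | _, _, _ => false
  | _, _, _ => false

def count_sequential_digits_py (digits : Option String) : Int :=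
  let s := (digits.getD "").toList
  (PySem.List.pyRange 0 ((s.length : Int) - 2) 1).foldl
    (fun count i => if pvAscAt s i then count + 1 else count) 0

-- ===== PORT B =====
-- loop state: (count, run, prev)
def pvStepB (st : Int × Int × Option Int) (ch : Char) : Int × Int × Option Int :=
  match PySem.Int.ofChars? [ch] with
  | none => (st.1, 0, none)
  | some d =>
    let run : Int :=
      match st.2.2 with
      | some p => if d = p + 1 then st.2.1 + 1 else 1
      | none => 1
    ((if 3 ≤ run then st.1 + 1 else st.1), run, some d)

def count_sequential_digits_py_alt (digits : Option String) : Int :=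
  (((digits.getD "").toList.foldl pvStepB (0, 0, none))).1

-- ===== PRECONDITION & SPEC =====
def Spec_count_sequential_digits_py (digits : Option String) (out : Int) : Prop := out = count_sequential_digits_py_alt digits
instance (digits : Option String) (out : Int) : Decidable (Spec_count_sequential_digits_py digits out) := by unfold Spec_count_sequential_digits_py; infer_instance

-- ===== CLAIM (what is proved, stated in full; the proofs are below) =====
def Claim_equal_count_sequential_digits_py : Prop := ∀ (digits : Option String), Dom_count_sequential_digits_py digits → Spec_count_sequential_digits_py digits (count_sequential_digits_py digits)

-- ===== LEMMAS AND PROOFS =====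

-- digit value of one char, as both ports compute it
def pvDv (c : Char) : Option Int := PySem.Int.ofChars? [c]

-- the ascending test on three concrete chars
def pvAsc3 (a b c : Char) : Bool :=
  match pvDv a, pvDv b, pvDv c with
  | some x, some y, some z => decide (x + 1 = y ∧ y + 1 = z)
  | _, _, _ => false

-- number of ascending windows fully inside s
def pvW : List Char → Int
  | c1 :: c2 :: c3 :: rest => (if pvAsc3 c1 c2 c3 then 1 else 0) + pvW (c2 :: c3 :: rest)
  | _ => 0
termination_by s => s.length

-- run-scan spec with context: prev = value of the previous char if it was a digit,
-- two = whether the previous two chars were consecutive ascending digits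
def pvT (prev : Option Int) (two : Bool) : List Char → Int
  | [] => 0
  | c :: rest =>
    match pvDv c with
    | none => pvT none false rest
    | some d =>
      match prev with
      | some p =>
        if d = p + 1 then (if two then 1 else 0) + pvT (some d) true rest
        else pvT (some d) false rest
      | none => pvT (some d) false rest

lemma pvW_cons3 (c1 c2 c3 : Char) (r : List Char) :
    pvW (c1 :: c2 :: c3 :: r) = (if pvAsc3 c1 c2 c3 then 1 else 0) + pvW (c2 :: c3 :: r) := by
  simp [pvW]

-- Bool test: does the option hold exactly the value v
def pvHit (o : Option Int) (v : Int) : Bool :=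
  match o with
  | some x => decide (x = v)
  | none => false

-- boundary windows: ascending windows using the context (…, p-1, p) and the first chars of s
def pvB (prev : Option Int) (two : Bool) (s : List Char) : Int :=
  match prev with
  | none => 0
  | some p =>
    match s with
    | [] => 0
    | [c1] => if two && pvHit (pvDv c1) (p + 1) then 1 else 0
    | c1 :: c2 :: _ =>
      (if two && pvHit (pvDv c1) (p + 1) then 1 else 0) +
      (if pvHit (pvDv c1) (p + 1) && pvHit (pvDv c2) (p + 2) then 1 else 0)

lemma pvT_skip (prev : Option Int) (two : Bool) (c : Char) (rest : List Char)
    (h : pvDv c = none) : pvT prev two (c :: rest) = pvT none false rest := by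
  simp [pvT, h]

lemma pvT_start (two : Bool) (c : Char) (rest : List Char) (d : Int)
    (h : pvDv c = some d) : pvT none two (c :: rest) = pvT (some d) false rest := by
  simp [pvT, h]

lemma pvT_match (two : Bool) (c : Char) (rest : List Char) (p : Int)
    (h : pvDv c = some (p + 1)) :
    pvT (some p) two (c :: rest) = (if two then 1 else 0) + pvT (some (p + 1)) true rest := by
  simp [pvT, h]

lemma pvT_break (two : Bool) (c : Char) (rest : List Char) (p d : Int)
    (h : pvDv c = some d) (hne : d ≠ p + 1) :
    pvT (some p) two (c :: rest) = pvT (some d) false rest := by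
  simp [pvT, h, hne]

lemma pvT_eq (s : List Char) : ∀ (prev : Option Int) (two : Bool),
    pvT prev two s = pvB prev two s + pvW s := by
  induction s with
  | nil => intro prev two; cases prev <;> simp [pvT, pvB, pvW]
  | cons c1 rest ih =>
    intro prev two
    rcases hdv : pvDv c1 with _ | d
    · -- non-digit first char: no window or boundary window can use c1
      have hB : pvB prev two (c1 :: rest) = 0 := by
        cases prev with
        | none => rfl
        | some p =>
          match rest with
          | [] => simp [pvB, pvHit, hdv]
          | c2 :: r => simp [pvB, pvHit, hdv]
      have hW' : pvW (c1 :: rest) = pvW rest := by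
        match rest with
        | [] => simp [pvW]
        | [_] => simp [pvW]
        | c2 :: c3 :: r => simp [pvW, pvAsc3, hdv]
      rw [pvT_skip _ _ _ _ hdv, ih none false, hB, hW']
      simp [pvB]
    · -- digit first char: split on prev and whether it matches
      cases prev with
      | none =>
        rw [pvT_start _ _ _ _ hdv, ih (some d) false]
        match rest with
        | [] => simp [pvB, pvW]
        | [c2] => simp [pvB, pvW, pvHit]
        | c2 :: c3 :: r =>
          rw [pvW_cons3]
          clear ih
          simp only [pvB, pvAsc3, pvHit, hdv]
          generalize pvW (c2 :: c3 :: r) = W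
          rcases h2 : pvDv c2 with _ | y <;> rcases h3 : pvDv c3 with _ | z <;>
            simp only [h2, h3] <;>
              cases two <;>
              simp only [Bool.false_and, Bool.and_false, Bool.true_and, Bool.and_true,
                Bool.false_eq_true, Bool.true_eq_false, decide_eq_true_eq, Bool.and_eq_true,
                if_false, if_true, true_and, false_and, and_true, and_false] <;>
              (try split_ifs) <;> first | rfl | omega | simp
      | some p =>
        by_cases hm : d = p + 1
        · subst hm
          rw [pvT_match _ _ _ _ hdv, ih (some (p + 1)) true]
          match rest with
          | [] => simp [pvB, pvW, pvHit, hdv]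
          | [c2] =>
            clear ih
            simp only [pvB, pvW, pvHit, hdv]
            rcases h2 : pvDv c2 with _ | y <;> simp only [h2] <;> simp <;>
              split_ifs <;> simp_all <;> omega
          | c2 :: c3 :: r =>
            rw [pvW_cons3]
            clear ih
            simp only [pvB, pvAsc3, pvHit, hdv]
            generalize pvW (c2 :: c3 :: r) = W
            rcases h2 : pvDv c2 with _ | y <;> rcases h3 : pvDv c3 with _ | z <;>
              simp only [h2, h3] <;>
              cases two <;>
              simp only [Bool.false_and, Bool.and_false, Bool.true_and, Bool.and_true,
                Bool.false_eq_true, Bool.true_eq_false, decide_eq_true_eq, Bool.and_eq_true,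
                if_false, if_true, true_and, false_and, and_true, and_false] <;>
              (try split_ifs) <;> first | rfl | omega | simp
        · rw [pvT_break _ _ _ _ _ hdv hm, ih (some d) false]
          match rest with
          | [] => simp [pvB, pvW, pvHit, hdv, hm]
          | [c2] => simp [pvB, pvW, pvHit, hdv, hm]
          | c2 :: c3 :: r =>
            rw [pvW_cons3]
            clear ih
            simp only [pvB, pvAsc3, pvHit, hdv]
            generalize pvW (c2 :: c3 :: r) = W
            rcases h2 : pvDv c2 with _ | y <;> rcases h3 : pvDv c3 with _ | z <;>
              simp only [h2, h3] <;>
              cases two <;>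
              simp only [Bool.false_and, Bool.and_false, Bool.true_and, Bool.and_true,
                Bool.false_eq_true, Bool.true_eq_false, decide_eq_true_eq, Bool.and_eq_true,
                if_false, if_true, true_and, false_and, and_true, and_false] <;>
              (try split_ifs) <;> first | rfl | omega | simp

-- the B fold from any consistent state
lemma pvB_fold (s : List Char) : ∀ (count run : Int) (prev : Option Int),
    (∀ p, prev = some p → 1 ≤ run) →
    (s.foldl pvStepB (count, run, prev)).1 = count + pvT prev (decide (2 ≤ run)) s := by
  induction s with
  | nil => intro count run prev _; simp [pvT]
  | cons c rest ih =>
    intro count run prev hinv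
    rcases hdv : pvDv c with _ | d
    · have hstep : pvStepB (count, run, prev) c = (count, 0, none) := by
        simp [pvStepB, pvDv] at hdv ⊢; simp [hdv]
      simp only [List.foldl_cons, hstep, ih count 0 none (by simp)]
      simp [pvT, hdv]
    · cases prev with
      | none =>
        have hstep : pvStepB (count, run, none) c = (count, 1, some d) := by
          simp [pvStepB, pvDv] at hdv ⊢; simp [hdv]
        simp only [List.foldl_cons, hstep,
          ih count 1 (some d) (by intro p hp; omega)]
        simp [pvT, hdv]
      | some p =>
        have h1 : 1 ≤ run := hinv p rfl
        by_cases hm : d = p + 1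
        · have hstep : pvStepB (count, run, some p) c =
              ((if 3 ≤ run + 1 then count + 1 else count), run + 1, some d) := by
            simp [pvStepB, pvDv] at hdv ⊢; simp [hdv, hm]
          simp only [List.foldl_cons, hstep,
            ih (if 3 ≤ run + 1 then count + 1 else count) (run + 1) (some d) (by intro q hq; omega)]
          have h2 : decide (2 ≤ run + 1) = true := by simp; omega
          simp only [pvT, hdv, hm, h2]
          by_cases h3 : 2 ≤ run
          · have : (3:Int) ≤ run + 1 := by omega
            simp [h3, this]; ring
          · have : ¬ (3:Int) ≤ run + 1 := by omega
            simp [h3, this]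
        · have hstep : pvStepB (count, run, some p) c = (count, 1, some d) := by
            simp [pvStepB, pvDv] at hdv ⊢; simp [hdv, hm]
          simp only [List.foldl_cons, hstep,
            ih count 1 (some d) (by intro q hq; omega)]
          simp [pvT, hdv, hm]

lemma pvAlt_eq_W (digits : Option String) : count_sequential_digits_py_alt digits = pvW ((digits.getD "").toList) := by
  unfold count_sequential_digits_py_alt
  rw [pvB_fold _ 0 0 none (by simp)]
  simp [pvT_eq, pvB]

-- A's window test at shifted indices
lemma pvAscAt_cons (c : Char) (t : List Char) (k : Nat) :
    pvAscAt (c :: t) ((k : Int) + 1) = pvAscAt t k := by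
  unfold pvAscAt
  rw [PySem.List.pyGet?_cons_succ]
  rw [show ((k : Int) + 1 + 1) = ((k + 1 : Nat) : Int) + 1 by push_cast; ring,
      PySem.List.pyGet?_cons_succ]
  rw [show ((k : Int) + 1 + 2) = ((k + 2 : Nat) : Int) + 1 by push_cast; ring,
      PySem.List.pyGet?_cons_succ]
  norm_num

lemma pvAscAt_zero (c1 c2 c3 : Char) (r : List Char) :
    pvAscAt (c1 :: c2 :: c3 :: r) 0 = pvAsc3 c1 c2 c3 := by
  unfold pvAscAt pvAsc3 pvDv
  have e0 : PySem.List.pyGet? (c1 :: c2 :: c3 :: r) 0 = some c1 := by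
    rw [show (0:Int) = ((0:Nat):Int) by norm_num, PySem.List.pyGet?_natCast]; rfl
  have e1 : PySem.List.pyGet? (c1 :: c2 :: c3 :: r) (0+1) = some c2 := by
    rw [show ((0:Int)+1) = ((1:Nat):Int) by norm_num, PySem.List.pyGet?_natCast]; rfl
  have e2 : PySem.List.pyGet? (c1 :: c2 :: c3 :: r) (0+2) = some c3 := by
    rw [show ((0:Int)+2) = ((2:Nat):Int) by norm_num, PySem.List.pyGet?_natCast]; rfl
  rw [e0, e1, e2]

lemma pvA_eq_W (s : List Char) :
    (PySem.List.pyRange 0 ((s.length : Int) - 2) 1).foldl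
      (fun count i => if pvAscAt s i then count + 1 else count) 0 = pvW s := by
  induction s with
  | nil => simp [PySem.List.pyRange_one_eq_nil, pvW]
  | cons c1 t ih =>
    match t, ih with
    | [], _ => simp [PySem.List.pyRange_one_eq_nil, pvW]
    | [c2], _ =>
      rw [PySem.List.pyRange_one_eq_nil (by simp)]
      simp [pvW]
    | c2 :: c3 :: r, ih =>
      rw [PySem.List.foldl_if_add_one] at ih ⊢
      rw [pvW_cons3, ← ih]
      rw [PySem.List.pyRange_one_cons (by simp; omega), List.countP_cons]
      have hz : pvAscAt (c1 :: c2 :: c3 :: r) 0 = pvAsc3 c1 c2 c3 := pvAscAt_zero c1 c2 c3 r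
      have hshift : (PySem.List.pyRange (0 + 1) ((↑(c1 :: c2 :: c3 :: r).length : Int) - 2) 1).countP
            (pvAscAt (c1 :: c2 :: c3 :: r)) =
          (PySem.List.pyRange 0 ((↑(c2 :: c3 :: r).length : Int) - 2) 1).countP
            (pvAscAt (c2 :: c3 :: r)) := by
        rw [PySem.List.pyRange_one, PySem.List.pyRange_one, List.countP_map, List.countP_map]
        have hn : (((c1 :: c2 :: c3 :: r).length : Int) - 2 - (0 + 1)).toNat =
            (((c2 :: c3 :: r).length : Int) - 2 - 0).toNat := by simp; omega
        rw [hn]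
        apply List.countP_congr
        intro k _
        simp only [Function.comp_apply]
        rw [show ((0 : Int) + 1 + (k : Int)) = ((k : Int) + 1) by ring,
            pvAscAt_cons c1 (c2 :: c3 :: r) k,
            show ((0 : Int) + (k : Int)) = (k : Int) by ring]
      rw [hz, hshift]
      cases pvAsc3 c1 c2 c3 <;> simp <;> push_cast <;> ring

-- ===== VERDICT (by name: the statement is the Claim_ definition above) =====
theorem count_sequential_digits_py_spec : Claim_equal_count_sequential_digits_py := by
  intro digits _
  unfold Spec_count_sequential_digits_py
  rw [pvAlt_eq_W]
  unfold count_sequential_digits_py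
  exact pvA_eq_W _
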